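-- pv_equiv track=rewrite | github.com/JMLizano/aoc-2023 | day11/part2.py | increment_distance
-- ===== SOURCE A (Python) =====
-- def increment_distance(pos_a, pos_b, expandable_columns, expandable_rows):
--     min_row = pos_a[0] if pos_a[0] <= pos_b[0] else pos_b[0]
--     max_row = pos_a[0] if pos_a[0] > pos_b[0] else pos_b[0]
--     min_col = pos_a[1] if pos_a[1] <= pos_b[1] else pos_b[1]
--     max_col = pos_a[1] if pos_a[1] > pos_b[1] else pos_b[1]
--     distance = 0
--     for row in expandable_rows:
--         if min_row < row < max_row:
--             distance += 999999
--     for col in expandable_columns: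
--         if min_col < col < max_col:
--             distance += 999999
--     return distance
-- ===== SOURCE B (Python) =====
-- def increment_distance(pos_a, pos_b, expandable_columns, expandable_rows):
--     # Sort-then-binary-search range count instead of a per-element filter scan.
--     def bisect_left(a, x):
--         lo, hi = 0, len(a)
--         while lo < hi:
--             mid = (lo + hi) // 2
--             if a[mid] < x:
--                 lo = mid + 1
--             else:
--                 hi = mid
--         return lo
--
--     def bisect_right(a, x):
--         lo, hi = 0, len(a)
--         while lo < hi:
--             mid = (lo + hi) // 2
--             if x < a[mid]:
--                 hi = mid
--             else:
--                 lo = mid + 1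
--         return lo
--
--     def count_open(xs, lo, hi):
--         if lo >= hi:
--             return 0
--         s = sorted(xs)
--         return bisect_left(s, hi) - bisect_right(s, lo)
--
--     row_count = count_open(expandable_rows, min(pos_a[0], pos_b[0]), max(pos_a[0], pos_b[0]))
--     col_count = count_open(expandable_columns, min(pos_a[1], pos_b[1]), max(pos_a[1], pos_b[1]))
--     return 999999 * (row_count + col_count)
-- ===== Notes on version B (the rewrite author's own statement) =====
-- stated objective: alternative
-- what changed: Replaces the two per-element open-interval filter scans with sorted copies of the row/column lists and a binary-search range count (bisect_left(hi) - bisect_right(lo)), multiplying the total count by 999999 once.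
import Mathlib
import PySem

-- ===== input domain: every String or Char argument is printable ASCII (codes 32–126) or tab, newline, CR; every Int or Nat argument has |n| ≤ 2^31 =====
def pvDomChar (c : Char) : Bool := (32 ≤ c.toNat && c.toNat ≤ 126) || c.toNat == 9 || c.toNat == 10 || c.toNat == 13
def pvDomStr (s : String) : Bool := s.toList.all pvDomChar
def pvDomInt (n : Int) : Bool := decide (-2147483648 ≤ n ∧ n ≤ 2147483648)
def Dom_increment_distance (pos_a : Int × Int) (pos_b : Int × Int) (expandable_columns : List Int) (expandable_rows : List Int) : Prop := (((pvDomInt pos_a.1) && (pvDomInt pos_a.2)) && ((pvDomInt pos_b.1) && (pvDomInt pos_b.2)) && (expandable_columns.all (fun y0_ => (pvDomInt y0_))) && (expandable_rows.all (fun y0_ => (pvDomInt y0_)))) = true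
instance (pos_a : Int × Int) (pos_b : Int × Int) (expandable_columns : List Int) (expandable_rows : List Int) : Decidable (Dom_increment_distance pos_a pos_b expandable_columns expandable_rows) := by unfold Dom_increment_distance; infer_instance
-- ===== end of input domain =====

-- B replaces the per-element open-interval filter scans by sorted copies plus a
-- binary-search range count (alternative algorithm, not claimed faster).

-- ===== PORT A =====
def increment_distance (pos_a : Int × Int) (pos_b : Int × Int) (expandable_columns : List Int) (expandable_rows : List Int) : Int :=
  let min_row := if pos_a.1 ≤ pos_b.1 then pos_a.1 else pos_b.1
  let max_row := if pos_a.1 > pos_b.1 then pos_a.1 else pos_b.1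
  let min_col := if pos_a.2 ≤ pos_b.2 then pos_a.2 else pos_b.2
  let max_col := if pos_a.2 > pos_b.2 then pos_a.2 else pos_b.2
  let distance : Int := expandable_rows.foldl
    (fun d row => if min_row < row ∧ row < max_row then d + 999999 else d) 0
  expandable_columns.foldl
    (fun d col => if min_col < col ∧ col < max_col then d + 999999 else d) distance

-- ===== PORT B =====
-- Source B's hand-written bisect_left/bisect_right are exactly CPython's bisect loops,
-- which are PySem.List.bisectLeft / bisectRight (the prelude's primitive for them).
def pvCountOpen (xs : List Int) (lo hi : Int) : Int :=
  if lo ≥ hi then 0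
  else
    let s := PySem.List.sorted xs (fun x => x) false
    ((PySem.List.bisectLeft s hi : Int) - (PySem.List.bisectRight s lo : Int))

def increment_distance_alt (pos_a : Int × Int) (pos_b : Int × Int) (expandable_columns : List Int) (expandable_rows : List Int) : Int :=
  let row_count := pvCountOpen expandable_rows (min pos_a.1 pos_b.1) (max pos_a.1 pos_b.1)
  let col_count := pvCountOpen expandable_columns (min pos_a.2 pos_b.2) (max pos_a.2 pos_b.2)
  999999 * (row_count + col_count)

-- ===== PRECONDITION & SPEC =====
def Spec_increment_distance (pos_a : Int × Int) (pos_b : Int × Int) (expandable_columns : List Int) (expandable_rows : List Int) (out : Int) : Prop := out = increment_distance_alt pos_a pos_b expandable_columns expandable_rows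
instance (pos_a : Int × Int) (pos_b : Int × Int) (expandable_columns : List Int) (expandable_rows : List Int) (out : Int) : Decidable (Spec_increment_distance pos_a pos_b expandable_columns expandable_rows out) := by unfold Spec_increment_distance; infer_instance

-- ===== CLAIM (what is proved, stated in full; the proofs are below) =====
def Claim_equal_increment_distance : Prop := ∀ (pos_a : Int × Int) (pos_b : Int × Int) (expandable_columns : List Int) (expandable_rows : List Int), Dom_increment_distance pos_a pos_b expandable_columns expandable_rows → Spec_increment_distance pos_a pos_b expandable_columns expandable_rows (increment_distance pos_a pos_b expandable_columns expandable_rows)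

-- ===== LEMMAS AND PROOFS =====

-- A's add-999999-if loop is 999999 times a countP.
theorem pv_foldl_if_add_c (p : Int → Prop) [DecidablePred p] (l : List Int) (a : Int) :
    l.foldl (fun d x => if p x then d + 999999 else d) a
      = a + 999999 * (l.countP (fun x => decide (p x)) : Int) := by
  induction l generalizing a with
  | nil => simp
  | cons x t ih =>
      simp only [List.foldl_cons, List.countP_cons, ih]
      by_cases h : p x <;> simp [h] <;> ring

-- A predicate that is true exactly on the first b elements counts to b.
theorem pv_countP_prefix (p : Int → Bool) (s : List Int) (b : Nat) (hb : b ≤ s.length)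
    (h2 : ∀ j (hj : j < s.length), j < b → p s[j] = true)
    (h3 : ∀ j (hj : j < s.length), b ≤ j → p s[j] = false) :
    s.countP p = b := by
  induction s generalizing b with
  | nil =>
      have hb0 : b = 0 := by simpa using hb
      simp [hb0]
  | cons x t ih =>
      cases b with
      | zero =>
          have hx := h3 0 (by simp) (Nat.zero_le _)
          simp only [List.getElem_cons_zero] at hx
          have ht : t.countP p = 0 :=
            ih 0 (Nat.zero_le _) (fun j hj hj0 => by omega)
              (fun j hj _ => by
                have := h3 (j+1) (by simpa using Nat.succ_lt_succ hj) (Nat.zero_le _)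
                simpa using this)
          simp [hx, ht]
      | succ n =>
          have hx := h2 0 (by simp) (Nat.succ_pos _)
          simp only [List.getElem_cons_zero] at hx
          have ht : t.countP p = n :=
            ih n (by simpa using Nat.succ_le_succ_iff.mp hb)
              (fun j hj hjn => by
                have := h2 (j+1) (by simpa using Nat.succ_lt_succ hj) (by omega)
                simpa using this)
              (fun j hj hjn => by
                have := h3 (j+1) (by simpa using Nat.succ_lt_succ hj) (by omega)
                simpa using this)
          simp [hx, ht]

-- Splitting < hi into ≤ lo and the open interval, when lo < hi.
theorem pv_countP_split (s : List Int) (lo hi : Int) (h : lo < hi) :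
    s.countP (fun e => decide (e < hi))
      = s.countP (fun e => decide (e ≤ lo)) + s.countP (fun e => decide (lo < e ∧ e < hi)) := by
  induction s with
  | nil => simp
  | cons x t ih =>
      simp only [List.countP_cons, ih]
      by_cases h1 : x < hi <;> by_cases h2 : x ≤ lo <;> by_cases h3 : lo < x <;>
        simp [h1, h2, h3] <;> omega

theorem pvCountOpen_eq (xs : List Int) (lo hi : Int) :
    pvCountOpen xs lo hi = (xs.countP (fun e => decide (lo < e ∧ e < hi)) : Int) := by
  unfold pvCountOpen
  by_cases h : lo ≥ hi
  · have h0 : xs.countP (fun e => decide (lo < e ∧ e < hi)) = 0 :=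
      List.countP_eq_zero.mpr (fun e _ => by simp; omega)
    rw [if_pos h, h0]
    norm_num
  · have hlt : lo < hi := by omega
    simp only [h, if_false]
    set s := PySem.List.sorted xs (fun x => x) false with hs
    have hpair : List.Pairwise (fun a b : Int => a ≤ b) s := by
      simpa using PySem.List.sorted_pairwise xs (fun x => x)
    obtain ⟨hbl1, hbl2, hbl3⟩ := PySem.List.bisectLeft_spec s hi hpair
    obtain ⟨hbr1, hbr2, hbr3⟩ := PySem.List.bisectRight_spec s lo hpair
    have hcl : s.countP (fun e => decide (e < hi)) = PySem.List.bisectLeft s hi :=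
      pv_countP_prefix _ s _ hbl1
        (fun j hj hjb => by simpa using hbl2 j hj hjb)
        (fun j hj hjb => by simpa using not_lt.mpr (hbl3 j hj hjb))
    have hcr : s.countP (fun e => decide (e ≤ lo)) = PySem.List.bisectRight s lo :=
      pv_countP_prefix _ s _ hbr1
        (fun j hj hjb => by simpa using hbr2 j hj hjb)
        (fun j hj hjb => by simpa using not_le.mpr (hbr3 j hj hjb))
    have hsplit := pv_countP_split s lo hi hlt
    have hperm : s.Perm xs := PySem.List.sorted_perm xs (fun x => x) false
    have hpc : s.countP (fun e => decide (lo < e ∧ e < hi))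
        = xs.countP (fun e => decide (lo < e ∧ e < hi)) := hperm.countP_eq _
    rw [← hcl, ← hcr, ← hpc] at *
    omega

-- ===== VERDICT (by name: the statement is the Claim_ definition above) =====
theorem increment_distance_spec : Claim_equal_increment_distance := by
  intro pos_a pos_b cols rows _
  unfold Spec_increment_distance increment_distance increment_distance_alt
  simp only [pv_foldl_if_add_c, pvCountOpen_eq]
  have hr : (if pos_a.1 ≤ pos_b.1 then pos_a.1 else pos_b.1) = min pos_a.1 pos_b.1 ∧
      (if pos_a.1 > pos_b.1 then pos_a.1 else pos_b.1) = max pos_a.1 pos_b.1 := by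
    constructor <;> split <;> omega
  have hc : (if pos_a.2 ≤ pos_b.2 then pos_a.2 else pos_b.2) = min pos_a.2 pos_b.2 ∧
      (if pos_a.2 > pos_b.2 then pos_a.2 else pos_b.2) = max pos_a.2 pos_b.2 := by
    constructor <;> split <;> omega
  rw [hr.1, hr.2, hc.1, hc.2]
  ring
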